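-- pv_equiv track=rewrite | github.com/chicorycolumn/WiktionaryScraper | utils/postprocessing/common.py | recursively_expand_tags
-- ===== SOURCE A (Python) =====
-- def recursively_expand_tags(input_stags: list, ref: object):
--     output_tags = []
--
--     def ret_inner(input_tags: list):
--         for tag in input_tags:
--             if tag in ref:
--                 ret_inner(ref[tag]["tags"])
--             elif tag not in output_tags:
--                 output_tags.append(tag)
--
--     ret_inner(input_stags)
--     return output_tags
-- ===== SOURCE B (Python) =====
-- def recursively_expand_tags(input_stags: list, ref: object):
--     # Phase 1: pure expansion -- flatten input to the preorder leaf stream (may contain duplicates).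
--     def leaves(tags):
--         acc = []
--         for t in tags:
--             if t in ref:
--                 acc.extend(leaves(ref[t]["tags"]))
--             else:
--                 acc.append(t)
--         return acc
--
--     # Phase 2: one dedup pass keeping first occurrences, O(1) membership via a set.
--     seen = set()
--     output_tags = []
--     for t in leaves(input_stags):
--         if t not in seen:
--             seen.add(t)
--             output_tags.append(t)
--     return output_tags
-- ===== Notes on version B (the rewrite author's own statement) =====
-- stated objective: alternative
-- what changed: B splits A's interleaved recursion into two phases: a pure recursive flatten producing the preorder leaf stream, then a single dedup pass keeping first occurrences with a hash set, instead of threading a shared output list with linear membership tests through the recursion.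
import Mathlib
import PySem

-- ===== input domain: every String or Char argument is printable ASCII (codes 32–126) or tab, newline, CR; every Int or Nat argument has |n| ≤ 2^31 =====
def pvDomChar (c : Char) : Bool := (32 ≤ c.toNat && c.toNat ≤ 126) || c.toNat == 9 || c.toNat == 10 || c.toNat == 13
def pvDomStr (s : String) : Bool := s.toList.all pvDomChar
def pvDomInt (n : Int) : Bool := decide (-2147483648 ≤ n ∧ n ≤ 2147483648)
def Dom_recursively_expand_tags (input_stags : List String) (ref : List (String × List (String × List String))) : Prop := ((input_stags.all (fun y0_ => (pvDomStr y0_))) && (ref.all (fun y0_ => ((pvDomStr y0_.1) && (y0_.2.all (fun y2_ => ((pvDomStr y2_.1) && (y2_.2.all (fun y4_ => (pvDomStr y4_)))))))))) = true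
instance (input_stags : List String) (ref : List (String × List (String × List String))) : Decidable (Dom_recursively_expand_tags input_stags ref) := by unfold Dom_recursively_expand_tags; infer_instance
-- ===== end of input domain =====

-- B separates A's interleaved recursion into a pure recursive flatten plus one dedup pass with a seen-set,
-- instead of threading a shared output list with linear membership tests through the recursion.
-- A mutates no argument; the equivalence is about the return value.

-- ref[tag]["tags"] : the inner dict lookup (Pre_ guarantees the key is present on every reached entry)
def pvTagsOf (inner : List (String × List String)) : List String :=
  PySem.Dict.getD (PySem.Dict.ofList inner) "tags" []

-- ===== PORT A =====
-- ret_inner, literal: fuel is a totality guard only — ref.length + 1 bounds the recursion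
-- depth on every input Pre_ admits (acyclic reachable part), so it never runs out there.
def pvRetInner (d : PySem.Dict String (List (String × List String))) :
    Nat → List String → List String → List String
  | 0, _, output_tags => output_tags
  | _ + 1, [], output_tags => output_tags
  | f + 1, tag :: rest, output_tags =>
    match PySem.Dict.get? d tag with
    | some inner => pvRetInner d (f + 1) rest (pvRetInner d f (pvTagsOf inner) output_tags)
    | none =>
      pvRetInner d (f + 1) rest (if tag ∈ output_tags then output_tags else output_tags ++ [tag])

def recursively_expand_tags (input_stags : List String) (ref : List (String × List (String × List String))) : List String :=
  pvRetInner (PySem.Dict.ofList ref) (ref.length + 1) input_stags []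

-- ===== PORT B =====
-- phase 1 of B: the preorder leaf stream (same fuel guard as port A)
def pvLeaves (d : PySem.Dict String (List (String × List String))) :
    Nat → List String → List String
  | 0, _ => []
  | _ + 1, [] => []
  | f + 1, tag :: rest =>
    (match PySem.Dict.get? d tag with
     | some inner => pvLeaves d f (pvTagsOf inner)
     | none => [tag]) ++ pvLeaves d (f + 1) rest

-- phase 2 of B: dedup keeping first occurrences, membership via the seen-set
def pvDedupPass : List String → PySem.Set String → List String → List String
  | [], _, output_tags => output_tags
  | t :: rest, seen, output_tags =>
    if PySem.Set.contains seen t then pvDedupPass rest seen output_tags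
    else pvDedupPass rest (PySem.Set.add seen t) (output_tags ++ [t])

def recursively_expand_tags_alt (input_stags : List String) (ref : List (String × List (String × List String))) : List String :=
  let d := PySem.Dict.ofList ref
  pvDedupPass (pvLeaves d (ref.length + 1) input_stags) PySem.Set.empty []

-- ===== PRECONDITION & SPEC =====
-- successors of a tag in the reference graph ([] when it is not a key or its entry has no "tags")
def pvSuccs (ref : List (String × List (String × List String))) (k : String) : List String :=
  match PySem.Dict.get? (PySem.Dict.ofList ref) k with
  | some inner => pvTagsOf inner
  | none => []

-- one closure step of reachability; iterated ref.length + 1 times it is the full reachable set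
def pvReach (ref : List (String × List (String × List String))) (xs : List String) : List String :=
  (fun ys => PySem.Set.ofList (ys ++ ys.flatMap (pvSuccs ref)))^[ref.length + 1] xs

-- Pre_ excludes exactly the inputs on which the Python A raises: a key reachable from input_stags
-- whose entry lacks "tags" (KeyError) or which can reach itself (cycle: RecursionError).
def Pre_recursively_expand_tags (input_stags : List String) (ref : List (String × List (String × List String))) : Prop :=
  ∀ k ∈ ref.map Prod.fst, k ∈ pvReach ref input_stags →
    ((match PySem.Dict.get? (PySem.Dict.ofList ref) k with
      | some inner => PySem.Dict.contains (PySem.Dict.ofList inner) "tags"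
      | none => true) = true
     ∧ k ∉ pvReach ref (pvSuccs ref k))
instance (input_stags : List String) (ref : List (String × List (String × List String))) : Decidable (Pre_recursively_expand_tags input_stags ref) := by unfold Pre_recursively_expand_tags; infer_instance

def pvWitness_recursively_expand_tags : List String × (List (String × List (String × List String))) :=
  (["a", "c"], [("a", [("tags", ["b", "c"])])])

def Spec_recursively_expand_tags (input_stags : List String) (ref : List (String × List (String × List String))) (out : List String) : Prop := out = recursively_expand_tags_alt input_stags ref
instance (input_stags : List String) (ref : List (String × List (String × List String))) (out : List String) : Decidable (Spec_recursively_expand_tags input_stags ref out) := by unfold Spec_recursively_expand_tags; infer_instance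

-- ===== CLAIM (what is proved, stated in full; the proofs are below) =====
def Claim_equal_recursively_expand_tags : Prop := ∀ (input_stags : List String) (ref : List (String × List (String × List String))), Dom_recursively_expand_tags input_stags ref → Pre_recursively_expand_tags input_stags ref → Spec_recursively_expand_tags input_stags ref (recursively_expand_tags input_stags ref)

-- ===== LEMMAS AND PROOFS =====

-- A's dedup step, without the seen-set: the reference form both sides are reduced to
def pvDedup2 : List String → List String → List String
  | [], output_tags => output_tags
  | t :: rest, output_tags =>
    pvDedup2 rest (if t ∈ output_tags then output_tags else output_tags ++ [t])

theorem pvDedupPass_eq_pvDedup2 (ls : List String) :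
    ∀ (seen : PySem.Set String) (out : List String), (∀ x, x ∈ seen ↔ x ∈ out) →
      pvDedupPass ls seen out = pvDedup2 ls out := by
  induction ls with
  | nil => intro seen out _; rfl
  | cons t rest ih =>
    intro seen out hinv
    by_cases hm : t ∈ out
    · have hs : t ∈ seen := (hinv t).mpr hm
      simp [pvDedupPass, pvDedup2, hs, hm, ih seen out hinv]
    · have hs : t ∉ seen := fun h => hm ((hinv t).mp h)
      simp only [pvDedupPass, pvDedup2, PySem.Set.contains_eq_listContains,
        List.contains_eq_mem, hs, decide_false, Bool.false_eq_true, if_false, if_neg hm]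
      exact ih _ _ (by
        intro x
        rw [PySem.Set.mem_add, List.mem_append, List.mem_singleton, hinv x])

theorem pvDedup2_append (a b : List String) :
    ∀ out, pvDedup2 (a ++ b) out = pvDedup2 b (pvDedup2 a out) := by
  induction a with
  | nil => intro out; rfl
  | cons t rest ih => intro out; simp only [List.cons_append, pvDedup2]; exact ih _

theorem pvRetInner_eq_pvDedup2_pvLeaves
    (d : PySem.Dict String (List (String × List String))) :
    ∀ (f : Nat) (ts out : List String),
      pvRetInner d f ts out = pvDedup2 (pvLeaves d f ts) out := by
  intro f
  induction f with
  | zero => intro ts out; simp [pvRetInner, pvLeaves, pvDedup2]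
  | succ f ihf =>
    intro ts
    induction ts with
    | nil => intro out; simp [pvRetInner, pvLeaves, pvDedup2]
    | cons t rest iht =>
      intro out
      cases hg : PySem.Dict.get? d t with
      | some inner =>
        simp only [pvRetInner, pvLeaves, hg, pvDedup2_append]
        rw [ihf (pvTagsOf inner) out, iht _]
      | none =>
        simp only [pvRetInner, pvLeaves, hg, List.singleton_append, pvDedup2]
        exact iht _

-- ===== VERDICT (by name: the statement is the Claim_ definition above) =====
theorem recursively_expand_tags_spec : Claim_equal_recursively_expand_tags := by
  intro input_stags ref _ _
  unfold Spec_recursively_expand_tags recursively_expand_tags recursively_expand_tags_alt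
  rw [pvDedupPass_eq_pvDedup2 _ PySem.Set.empty [] (by intro x; simp [PySem.Set.empty])]
  exact pvRetInner_eq_pvDedup2_pvLeaves _ _ _ _
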